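-- pv_equiv track=rewrite | github.com/brendanbab8/lin_alg_lib | eigenvalues.py | signs
-- ===== SOURCE A (Python) =====
-- def signs(lst):
--     pos = False
--     neg = False
--     i = 0
--     while not (pos * neg) and i < len(lst):
--         if lst[i] > 0:
--             pos = True
--         elif lst[i] < 0:
--             neg = True
--         i += 1
--     return [pos, neg]
-- ===== SOURCE B (Python) =====
-- def signs(lst):
--     pos = any(x > 0 for x in lst)
--     neg = any(x < 0 for x in lst)
--     return [pos, neg]
-- ===== Notes on version B (the rewrite author's own statement) =====
-- stated objective: simpler
-- what changed: Replaces the fused indexed while loop with manual early-exit state by two independent short-circuiting any() scans, one per sign.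
import Mathlib
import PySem

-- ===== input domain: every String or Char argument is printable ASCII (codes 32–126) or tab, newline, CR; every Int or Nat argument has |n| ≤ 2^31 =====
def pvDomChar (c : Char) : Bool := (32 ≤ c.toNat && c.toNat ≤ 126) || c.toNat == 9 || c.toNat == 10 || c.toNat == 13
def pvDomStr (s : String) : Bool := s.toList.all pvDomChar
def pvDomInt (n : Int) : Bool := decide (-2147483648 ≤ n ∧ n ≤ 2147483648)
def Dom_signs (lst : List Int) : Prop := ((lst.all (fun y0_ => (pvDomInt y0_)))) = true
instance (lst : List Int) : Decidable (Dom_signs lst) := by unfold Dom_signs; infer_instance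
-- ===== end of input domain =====

-- ===== PORT A =====
-- B replaces A's fused early-exit while loop by two independent any() scans; same return value (simpler).
-- literal port of A's while loop: state (pos, neg), index i; fuel only makes totality structural
def signsLoop (lst : List Int) (pos neg : Bool) (i : Nat) : Nat -> Bool × Bool
  | 0 => (pos, neg)
  | fuel + 1 =>
    if h : (!(pos && neg)) = true ∧ i < lst.length then
      if lst[i]'h.2 > 0 then signsLoop lst true neg (i + 1) fuel
      else if lst[i]'h.2 < 0 then signsLoop lst pos true (i + 1) fuel
      else signsLoop lst pos neg (i + 1) fuel
    else (pos, neg)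

def signs (lst : List Int) : List Bool :=
  let r := signsLoop lst false false 0 lst.length
  [r.1, r.2]

-- ===== PORT B =====
def signs_alt (lst : List Int) : List Bool :=
  [lst.any (fun x => x > 0), lst.any (fun x => x < 0)]

-- ===== PRECONDITION & SPEC =====
def Spec_signs (lst : List Int) (out : List Bool) : Prop := out = signs_alt lst
instance (lst : List Int) (out : List Bool) : Decidable (Spec_signs lst out) := by unfold Spec_signs; infer_instance

-- ===== CLAIM (what is proved, stated in full; the proofs are below) =====
def Claim_equal_signs : Prop := ∀ (lst : List Int), Dom_signs lst → Spec_signs lst (signs lst)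

-- ===== LEMMAS AND PROOFS =====
theorem signsLoop_eq (lst : List Int) (fuel : Nat) :
    ∀ (pos neg : Bool) (i : Nat), lst.length - i ≤ fuel →
    signsLoop lst pos neg i fuel =
      (pos || (lst.drop i).any (fun x => x > 0),
       neg || (lst.drop i).any (fun x => x < 0)) := by
  induction fuel with
  | zero =>
      intro pos neg i hle
      rw [List.drop_eq_nil_of_le (by omega)]
      simp [signsLoop]
  | succ fuel ih =>
      intro pos neg i hle
      rw [signsLoop]
      by_cases h : (!(pos && neg)) = true ∧ i < lst.length
      · rw [dif_pos h, List.drop_eq_getElem_cons h.2]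
        by_cases hgt : lst[i]'h.2 > 0
        · have h1 : decide (lst[i]'h.2 > 0) = true := by simpa using hgt
          have h2 : decide (lst[i]'h.2 < 0) = false := by simp; omega
          rw [if_pos hgt, ih true neg (i + 1) (by omega)]
          simp only [List.any_cons, h1, h2, Bool.true_or, Bool.or_true, Bool.false_or]
        · by_cases hlt : lst[i]'h.2 < 0
          · have h1 : decide (lst[i]'h.2 > 0) = false := by simp; omega
            have h2 : decide (lst[i]'h.2 < 0) = true := by simpa using hlt
            rw [if_neg hgt, if_pos hlt, ih pos true (i + 1) (by omega)]
            simp only [List.any_cons, h1, h2, Bool.true_or, Bool.or_true, Bool.false_or]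
          · have h1 : decide (lst[i]'h.2 > 0) = false := by simp; omega
            have h2 : decide (lst[i]'h.2 < 0) = false := by simp; omega
            rw [if_neg hgt, if_neg hlt, ih pos neg (i + 1) (by omega)]
            simp only [List.any_cons, h1, h2, Bool.false_or]
      · rw [dif_neg h]
        rcases Decidable.em (i < lst.length) with hlt | hge
        · rcases Bool.eq_false_or_eq_true (pos && neg) with hb | hb
          · rw [Bool.and_eq_true] at hb
            simp [hb.1, hb.2]
          · exact absurd ⟨by simp [hb], hlt⟩ h
        · rw [List.drop_eq_nil_of_le (by omega)]
          simp

-- ===== VERDICT (by name: the statement is the Claim_ definition above) =====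
theorem signs_spec : Claim_equal_signs := by
  intro lst _
  show _ = _
  simp [signs, signs_alt, signsLoop_eq lst lst.length false false 0 (by omega)]
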